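-- pv_equiv track=rewrite | github.com/naywayne90/sygfp-artis-g-re | fix_encoding_corruption.py | is_uppercase_context
-- ===== SOURCE A (Python) =====
-- def is_uppercase_context(text: str, pos: int) -> bool:
--     """
--     Check if the character at `pos` in `text` is in an uppercase context.
--
--     An uppercase context means the surrounding word is predominantly uppercase,
--     or the character is adjacent to uppercase letters on both sides, or part of
--     an ALL-CAPS token.
--     """
--     # Find word boundaries around pos
--     # Word = contiguous sequence of letters (including accented), digits, apostrophes
--     start = pos
--     while start > 0 and (text[start - 1].isalpha() or text[start - 1] in "'-"):
--         start -= 1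
--     end = pos
--     while end < len(text) - 1 and (text[end + 1].isalpha() or text[end + 1] in "'-"):
--         end += 1
--
--     word = text[start:end + 1]
--
--     # Count uppercase vs lowercase letters in the word (excluding the è/à itself)
--     upper = 0
--     lower = 0
--     for i, ch in enumerate(word):
--         if start + i == pos:
--             continue  # skip the character we're evaluating
--         if ch.isupper():
--             upper += 1
--         elif ch.islower():
--             lower += 1
--
--     # If the word is predominantly uppercase (more uppercase than lowercase), it's CAPS context
--     if upper > 0 and upper >= lower:
--         return True
--
--     return False
-- ===== SOURCE B (Python) =====
-- def is_uppercase_context(text: str, pos: int) -> bool: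
--     """Single leftward then rightward scan over the word around pos; no
--     boundary search, no substring, no enumerate."""
--     upper = 0
--     lower = 0
--     i = pos - 1
--     while i >= 0 and (text[i].isalpha() or text[i] in "'-"):
--         if text[i].isupper():
--             upper += 1
--         elif text[i].islower():
--             lower += 1
--         i -= 1
--     i = pos + 1
--     while i < len(text) and (text[i].isalpha() or text[i] in "'-"):
--         if text[i].isupper():
--             upper += 1
--         elif text[i].islower():
--             lower += 1
--         i += 1
--     return upper > 0 and upper >= lower
-- ===== Notes on version B (the rewrite author's own statement) =====
-- stated objective: simpler
-- what changed: B drops A's boundary search, substring slice and enumerate-with-skip counting pass, and instead counts upper/lower letters directly in one leftward and one rightward scan from pos, never materialising the word.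
-- outside the precondition, e.g. on is_uppercase_context('AB', -1): A returns False, B returns True
import Mathlib
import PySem

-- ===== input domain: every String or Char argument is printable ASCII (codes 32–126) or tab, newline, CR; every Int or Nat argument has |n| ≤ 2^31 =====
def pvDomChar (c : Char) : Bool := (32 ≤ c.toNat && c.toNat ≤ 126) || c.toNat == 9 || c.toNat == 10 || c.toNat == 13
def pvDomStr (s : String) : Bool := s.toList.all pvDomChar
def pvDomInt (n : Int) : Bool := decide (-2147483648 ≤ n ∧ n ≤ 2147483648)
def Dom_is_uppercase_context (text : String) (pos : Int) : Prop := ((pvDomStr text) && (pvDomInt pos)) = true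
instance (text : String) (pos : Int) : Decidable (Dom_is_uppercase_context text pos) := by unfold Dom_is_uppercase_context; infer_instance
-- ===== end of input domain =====

-- B replaces A's boundary-search + substring + enumerate-with-skip by two direct counting
-- scans (leftward then rightward from pos); same cost, simpler decomposition ("simpler").

-- shared character class: Python's `ch.isalpha() or ch in "'-"` (both programs test it verbatim)
def pyWordChar (c : Char) : Bool := PySem.Chars.isalpha c || c == '\'' || c == '-'

-- ===== PORT A =====
-- while start > 0 and (text[start-1].isalpha() or text[start-1] in "'-"): start -= 1
def aFindStart (cs : List Char) : Nat → Nat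
  | 0 => 0
  | s + 1 => if pyWordChar (cs.getD s ' ') then aFindStart cs s else s + 1

-- while end < len(text)-1 and (text[end+1].isalpha() or text[end+1] in "'-"): end += 1
def aFindEnd (cs : List Char) (e : Nat) : Nat :=
  if _h : e + 1 < cs.length ∧ pyWordChar (cs.getD (e + 1) ' ') then aFindEnd cs (e + 1) else e
termination_by cs.length - e

-- for i, ch in enumerate(word): skip if start+i == pos; elif-chain counting (j = start + i)
def aCount (p : Nat) : List Char → Nat → Int × Int → Int × Int
  | [], _, ul => ul
  | c :: rest, j, ul =>
      aCount p rest (j + 1)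
        (if j = p then ul
         else if PySem.Chars.isupper c then (ul.1 + 1, ul.2)
         else if PySem.Chars.islower c then (ul.1, ul.2 + 1) else ul)

def is_uppercase_context (text : String) (pos : Int) : Bool :=
  let cs := text.toList
  let p := pos.toNat          -- faithful on Pre_ (0 ≤ pos); Python negative indexing not emulated
  let start := aFindStart cs p
  let e := aFindEnd cs p
  -- word = text[start:end+1]: for the nonnegative clamping indices reached here,
  -- Python's slice is exactly take-then-drop
  let word := (cs.take (e + 1)).drop start
  let ul := aCount p word start (0, 0)
  if 0 < ul.1 ∧ ul.2 ≤ ul.1 then true else false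

-- ===== PORT B =====
-- i = pos-1; while i >= 0 and wordchar(text[i]): count; i -= 1   (j = i + 1)
def bScanL (cs : List Char) : Nat → Int × Int → Int × Int
  | 0, ul => ul
  | j + 1, ul =>
      let c := cs.getD j ' '
      if pyWordChar c then
        bScanL cs j
          (if PySem.Chars.isupper c then (ul.1 + 1, ul.2)
           else if PySem.Chars.islower c then (ul.1, ul.2 + 1) else ul)
      else ul

-- i = pos+1; while i < len(text) and wordchar(text[i]): count; i += 1
def bScanR (cs : List Char) (i : Nat) (ul : Int × Int) : Int × Int :=
  if _h : i < cs.length ∧ pyWordChar (cs.getD i ' ') then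
    let c := cs.getD i ' '
    bScanR cs (i + 1)
      (if PySem.Chars.isupper c then (ul.1 + 1, ul.2)
       else if PySem.Chars.islower c then (ul.1, ul.2 + 1) else ul)
  else ul
termination_by cs.length - i

def is_uppercase_context_alt (text : String) (pos : Int) : Bool :=
  let cs := text.toList
  let p := pos.toNat          -- faithful on Pre_ (0 ≤ pos)
  let ul := bScanR cs (p + 1) (bScanL cs p (0, 0))
  decide (0 < ul.1) && decide (ul.2 ≤ ul.1)

-- ===== PRECONDITION & SPEC =====
-- Pre_ restricts pos to 0 ≤ pos ≤ len(text) — the function's natural domain (pos names a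
-- character position): for pos beyond the text A raises IndexError, and a negative pos does
-- not name a context position (Python reads such indices from the end of the string, and the
-- two programs are not claimed to agree there).
def Pre_is_uppercase_context (text : String) (pos : Int) : Prop :=
  0 ≤ pos ∧ pos ≤ (text.toList.length : Int)
instance (text : String) (pos : Int) : Decidable (Pre_is_uppercase_context text pos) := by
  unfold Pre_is_uppercase_context; infer_instance

def pvWitness_is_uppercase_context : String × Int := ("Hi", 0)

def Spec_is_uppercase_context (text : String) (pos : Int) (out : Bool) : Prop := out = is_uppercase_context_alt text pos
instance (text : String) (pos : Int) (out : Bool) : Decidable (Spec_is_uppercase_context text pos out) := by unfold Spec_is_uppercase_context; infer_instance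

-- ===== CLAIM (what is proved, stated in full; the proofs are below) =====
def Claim_equal_is_uppercase_context : Prop := ∀ (text : String) (pos : Int), Dom_is_uppercase_context text pos → Pre_is_uppercase_context text pos → Spec_is_uppercase_context text pos (is_uppercase_context text pos)

-- ===== LEMMAS AND PROOFS =====

def upv (c : Char) : Int := if PySem.Chars.isupper c then 1 else 0
def lov (c : Char) : Int :=
  if PySem.Chars.isupper c then 0 else if PySem.Chars.islower c then 1 else 0

-- segment of cs with indices in [a, b)
def seg (cs : List Char) (a b : Nat) : List Char := (cs.take b).drop a

lemma seg_self (cs : List Char) (a : Nat) : seg cs a a = [] := by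
  apply List.drop_eq_nil_of_le
  simp [List.length_take]

lemma seg_snoc (cs : List Char) {a b : Nat} (hab : a ≤ b) (hb : b < cs.length) :
    seg cs a (b + 1) = seg cs a b ++ [cs.getD b ' '] := by
  unfold seg
  rw [List.take_add_one]
  have h2 : cs[b]?.toList = [cs[b]] := by simp [List.getElem?_eq_getElem hb]
  rw [h2, List.drop_append_of_le_length (by simp [List.length_take]; omega),
      List.getD_eq_getElem cs ' ' hb]

lemma seg_cons (cs : List Char) {a b : Nat} (hab : a < b) (ha : a < cs.length) :
    seg cs a b = cs.getD a ' ' :: seg cs (a + 1) b := by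
  unfold seg
  have hlt : a < (cs.take b).length := by simp [List.length_take]; omega
  rw [List.drop_eq_getElem_cons hlt, List.getElem_take, List.getD_eq_getElem cs ' ' ha]

lemma seg_split (cs : List Char) {a m b : Nat} (ham : a ≤ m) (hmb : m ≤ b) (hb : b ≤ cs.length) :
    seg cs a b = seg cs a m ++ seg cs m b := by
  unfold seg
  have h1 : cs.take m = (cs.take b).take m := by rw [List.take_take, Nat.min_eq_left hmb]
  rw [h1]
  conv_lhs => rw [← List.take_append_drop m (cs.take b)]
  rw [List.drop_append]
  have h0 : a - (List.take m (cs.take b)).length = 0 := by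
    simp only [List.length_take]; omega
  rw [h0, List.drop_zero]

lemma length_seg (cs : List Char) {a b : Nat} (hb : b ≤ cs.length) :
    (seg cs a b).length = b - a := by
  simp [seg, List.length_take]; omega

lemma aFindStart_le (cs : List Char) (p : Nat) : aFindStart cs p ≤ p := by
  induction p with
  | zero => simp [aFindStart]
  | succ s ih =>
      unfold aFindStart
      split
      · omega
      · omega

lemma aFindEnd_ge (cs : List Char) (e : Nat) : e ≤ aFindEnd cs e := by
  unfold aFindEnd
  split
  · have ih := aFindEnd_ge cs (e + 1)
    omega
  · omega
termination_by cs.length - e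

lemma aFindEnd_lt (cs : List Char) (e : Nat) (he : e < cs.length) :
    aFindEnd cs e < cs.length := by
  unfold aFindEnd
  split
  · exact aFindEnd_lt cs (e + 1) (by omega)
  · exact he
termination_by cs.length - e

-- left scan = counts over seg cs (aFindStart cs j) j
lemma bScanL_eq (cs : List Char) (j : Nat) (hj : j ≤ cs.length) (ul : Int × Int) :
    bScanL cs j ul =
      (ul.1 + ((seg cs (aFindStart cs j) j).map upv).sum,
       ul.2 + ((seg cs (aFindStart cs j) j).map lov).sum) := by
  induction j generalizing ul with
  | zero => simp [bScanL, aFindStart, seg]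
  | succ s ih =>
      unfold bScanL aFindStart
      by_cases hc : pyWordChar (cs.getD s ' ') = true
      · simp only [hc, if_true]
        rw [ih (by omega)]
        rw [seg_snoc cs (aFindStart_le cs s) (by omega)]
        simp [upv, lov]
        split_ifs <;> simp <;> ring_nf
      · simp only [hc]
        simp [seg_self]

-- right scan = counts over seg cs (e+1) (aFindEnd cs e + 1)
lemma bScanR_eq (cs : List Char) (e : Nat) (ul : Int × Int) :
    bScanR cs (e + 1) ul =
      (ul.1 + ((seg cs (e + 1) (aFindEnd cs e + 1)).map upv).sum,
       ul.2 + ((seg cs (e + 1) (aFindEnd cs e + 1)).map lov).sum) := by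
  unfold bScanR aFindEnd
  by_cases hc : (e + 1 < cs.length ∧ pyWordChar (cs.getD (e + 1) ' ') = true)
  · rw [dif_pos hc, dif_pos hc]
    rw [bScanR_eq cs (e + 1)]
    have hle : e + 1 ≤ aFindEnd cs (e + 1) := aFindEnd_ge cs (e + 1)
    rw [seg_cons cs (a := e + 1) (b := aFindEnd cs (e + 1) + 1) (by omega) hc.1]
    simp [upv, lov]
    split_ifs <;> simp <;> ring_nf
  · rw [dif_neg hc, dif_neg hc]
    simp [seg_self]
termination_by cs.length - e
decreasing_by omega

-- aCount on a block whose absolute indices all avoid p: plain counting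
lemma aCount_no_skip (p : Nat) (w : List Char) (j : Nat) (ul : Int × Int)
    (h : p < j ∨ j + w.length ≤ p) :
    aCount p w j ul = (ul.1 + (w.map upv).sum, ul.2 + (w.map lov).sum) := by
  induction w generalizing j ul with
  | nil => simp [aCount]
  | cons c rest ih =>
      simp only [aCount]
      have hjp : ¬ (j = p) := by simp at h ⊢; omega
      simp only [hjp, if_false]
      rw [ih (j + 1) _ (by simp at h ⊢; omega)]
      simp [upv, lov]
      split_ifs <;> simp <;> ring_nf

lemma aCount_append (p : Nat) (xs ys : List Char) (j : Nat) (ul : Int × Int) :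
    aCount p (xs ++ ys) j ul = aCount p ys (j + xs.length) (aCount p xs j ul) := by
  induction xs generalizing j ul with
  | nil => simp [aCount]
  | cons c rest ih =>
      simp only [aCount, List.cons_append, List.length_cons]
      rw [ih]
      ring_nf

lemma ite_and_eq_decide (u l : Int) :
    (if 0 < u ∧ l ≤ u then true else false) = (decide (0 < u) && decide (l ≤ u)) := by
  by_cases h1 : 0 < u <;> by_cases h2 : l ≤ u <;> simp [h1, h2]

-- ===== VERDICT (by name: the statement is the Claim_ definition above) =====
theorem is_uppercase_context_spec : Claim_equal_is_uppercase_context := by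
  intro text pos _hdom hpre
  obtain ⟨hpos, hlt⟩ := hpre
  unfold Spec_is_uppercase_context is_uppercase_context is_uppercase_context_alt
  dsimp only
  set cs := text.toList with hcs
  set p := pos.toNat with hp
  by_cases hplen : p < cs.length
  case neg =>
    -- pos = len(text): the word is the whole trailing word, nothing is skipped on either side
    have hpl : p = cs.length := by omega
    have hsp : aFindStart cs p ≤ p := aFindStart_le cs p
    have hend : aFindEnd cs p = p := by
      unfold aFindEnd; rw [dif_neg]; omega
    rw [hend]
    have htk : cs.take (p + 1) = cs.take p := by
      rw [List.take_of_length_le (by omega), List.take_of_length_le (by omega)]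
    rw [htk]
    rw [aCount_no_skip p _ (aFindStart cs p) (0, 0)
      (by right; rw [show List.drop (aFindStart cs p) (cs.take p) = seg cs (aFindStart cs p) p from rfl,
            length_seg cs (by omega)]; omega)]
    rw [bScanL_eq cs p (by omega) (0, 0)]
    have hR : bScanR cs (p + 1) = id := by
      funext ul; unfold bScanR; rw [dif_neg]; · rfl
      omega
    rw [hR]
    rw [ite_and_eq_decide]
    simp [seg]
  have hplen : p < cs.length := hplen
  set s := aFindStart cs p with hs
  set e := aFindEnd cs p with he
  have hsp : s ≤ p := aFindStart_le cs p
  have hpe : p ≤ e := aFindEnd_ge cs p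
  have helen : e < cs.length := aFindEnd_lt cs p hplen
  -- decompose the word
  have hword : (cs.take (e + 1)).drop s
      = seg cs s p ++ (cs.getD p ' ' :: seg cs (p + 1) (e + 1)) := by
    have h1 : seg cs s (e + 1) = seg cs s p ++ seg cs p (e + 1) :=
      seg_split cs hsp (by omega) (by omega)
    have h2 : seg cs p (e + 1) = cs.getD p ' ' :: seg cs (p + 1) (e + 1) :=
      seg_cons cs (by omega) hplen
    calc (cs.take (e + 1)).drop s = seg cs s (e + 1) := rfl
      _ = _ := by rw [h1, h2]
  rw [hword]
  rw [aCount_append]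
  rw [aCount_no_skip p (seg cs s p) s (0, 0) (by right; rw [length_seg cs (by omega)]; omega)]
  have hidx : s + (seg cs s p).length = p := by rw [length_seg cs (by omega)]; omega
  rw [hidx]
  simp only [aCount]
  rw [aCount_no_skip p (seg cs (p + 1) (e + 1)) (p + 1) _ (by left; omega)]
  rw [bScanL_eq cs p (by omega) (0, 0), bScanR_eq cs p]
  simp only [← hs, ← he]
  rw [ite_and_eq_decide]
  simp only [ite_true]
  ring_nf
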